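-- pv_equiv track=rewrite | github.com/jack-at-someai/na-k-atpase-3d | knowledge-graph/extract/extract_references.py | _find_top_level_objects
-- ===== SOURCE A (Python) =====
-- def _find_top_level_objects(array_text: str) -> list[str]:
--     """Given the text of a JS array [...], find the top-level { ... } objects.
--
--     These are the section objects within SECTIONS.
--     """
--     objects = []
--     # We need to find { ... } at depth 1 inside the array (depth 0 = the [ itself)
--     depth = 0
--     i = 0
--     obj_start = -1
--     while i < len(array_text):
--         ch = array_text[i]
--         if ch == '[':
--             depth += 1
--         elif ch == ']':
--             depth -= 1
--         elif ch == '{' and depth == 1: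
--             # Start of a top-level object
--             obj_start = i
--             brace_depth = 1
--             i += 1
--             while i < len(array_text) and brace_depth > 0:
--                 c = array_text[i]
--                 if c == '{':
--                     brace_depth += 1
--                 elif c == '}':
--                     brace_depth -= 1
--                 elif c in ('"', "'"):
--                     quote = c
--                     i += 1
--                     while i < len(array_text) and array_text[i] != quote:
--                         if array_text[i] == '\\':
--                             i += 1
--                         i += 1
--                 elif c == '`':
--                     i += 1
--                     while i < len(array_text) and array_text[i] != '`':
--                         if array_text[i] == '\\':
--                             i += 1
--                         i += 1
--                 elif c == '/' and i + 1 < len(array_text):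
--                     if array_text[i + 1] == '/':
--                         while i < len(array_text) and array_text[i] != '\n':
--                             i += 1
--                     elif array_text[i + 1] == '*':
--                         i += 2
--                         while i < len(array_text) - 1 and not (array_text[i] == '*' and array_text[i + 1] == '/'):
--                             i += 1
--                         i += 1
--                 i += 1
--             objects.append(array_text[obj_start:i])
--             continue
--         i += 1
--     return objects
-- ===== SOURCE B (Python) =====
-- def _find_top_level_objects(array_text: str) -> list[str]:
--     """Flat single-pass state machine: one character per iteration, a `state`
--     variable replaces A's nested while-loops.  String/comment states are only
--     reachable from inside an object, matching the original's behaviour."""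
--     objects = []
--     n = len(array_text)
--     state = 'array'        # 'array' | 'object' | 'string' | 'line' | 'block'
--     quote = ''             # active quote char while state == 'string'
--     depth = 0              # [ / ] nesting, tracked only in 'array' state
--     brace_depth = 0        # { / } nesting while inside an object
--     obj_start = 0
--     i = 0
--     while i < n:
--         c = array_text[i]
--         if state == 'array':
--             if c == '[':
--                 depth += 1
--             elif c == ']':
--                 depth -= 1
--             elif c == '{' and depth == 1:
--                 state = 'object'
--                 brace_depth = 1
--                 obj_start = i
--             i += 1
--         elif state == 'object':
--             if c == '{':
--                 brace_depth += 1
--             elif c == '}':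
--                 brace_depth -= 1
--                 if brace_depth == 0:
--                     objects.append(array_text[obj_start:i + 1])
--                     state = 'array'
--             elif c in ('"', "'", '`'):
--                 state = 'string'
--                 quote = c
--             elif c == '/' and i + 1 < n and array_text[i + 1] == '/':
--                 state = 'line'
--                 i += 1
--             elif c == '/' and i + 1 < n and array_text[i + 1] == '*':
--                 state = 'block'
--                 i += 1
--             i += 1
--         elif state == 'string':
--             if c == quote:
--                 state = 'object'
--                 i += 1
--             elif c == '\\':
--                 i += 2
--             else:
--                 i += 1
--         elif state == 'line':
--             if c == '\n':
--                 state = 'object'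
--             i += 1
--         else:  # 'block'
--             if c == '*' and i + 1 < n and array_text[i + 1] == '/':
--                 state = 'object'
--                 i += 2
--             else:
--                 i += 1
--     if state != 'array':
--         objects.append(array_text[obj_start:])
--     return objects
-- ===== Notes on version B (the rewrite author's own statement) =====
-- stated objective: alternative
-- what changed: Replaced A's nested while-loops (an inner object loop containing dedicated sub-loops for strings, template literals, line and block comments) by one flat single-pass loop that handles exactly one position per iteration and dispatches on an explicit state variable (array/object/string/line/block).
import Mathlib
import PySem

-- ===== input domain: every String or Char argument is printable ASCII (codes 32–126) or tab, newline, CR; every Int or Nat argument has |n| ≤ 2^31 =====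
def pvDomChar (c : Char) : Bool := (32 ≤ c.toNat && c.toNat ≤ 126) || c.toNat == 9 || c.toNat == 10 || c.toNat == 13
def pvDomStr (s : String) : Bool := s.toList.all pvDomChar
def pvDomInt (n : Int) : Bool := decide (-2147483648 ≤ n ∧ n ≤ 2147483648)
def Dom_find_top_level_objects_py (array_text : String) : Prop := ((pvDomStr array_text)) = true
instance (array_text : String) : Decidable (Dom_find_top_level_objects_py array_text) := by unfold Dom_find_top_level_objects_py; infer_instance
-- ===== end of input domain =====

-- B replaces A's nested scanning loops by one flat per-character state machine (objective: alternative, same cost).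

-- ===== PORT A =====
-- A's inner `while … != quote` string skipper (also used for backticks).
def aSkipQ (cs : List Char) (q : Char) (i : Nat) : Nat :=
  if h : i < cs.length then
    if cs.getD i ' ' == q then i
    else if cs.getD i ' ' == '\\' then aSkipQ cs q (i + 2) else aSkipQ cs q (i + 1)
  else i
termination_by cs.length - i
decreasing_by
  all_goals exact Nat.sub_lt_sub_left h (Nat.lt_add_of_pos_right (by decide))

-- A's `while … != '\n'` line-comment skipper.
def aLine (cs : List Char) (i : Nat) : Nat :=
  if h : i < cs.length then
    if cs.getD i ' ' == '\n' then i else aLine cs (i + 1)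
  else i
termination_by cs.length - i
decreasing_by
  exact Nat.sub_lt_sub_left h (Nat.lt_add_of_pos_right (by decide))

-- A's `while i < n-1 and not '*/'` block-comment skipper.
def aBlock (cs : List Char) (i : Nat) : Nat :=
  if h : i + 1 < cs.length then
    if cs.getD i ' ' == '*' && cs.getD (i + 1) ' ' == '/' then i else aBlock cs (i + 1)
  else i
termination_by cs.length - i
decreasing_by
  exact Nat.sub_lt_sub_left (Nat.lt_of_succ_lt h) (Nat.lt_add_of_pos_right (by decide))

theorem aSkipQ_ge (cs : List Char) (q : Char) (i : Nat) : i ≤ aSkipQ cs q i := by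
  rw [aSkipQ]
  split_ifs with h1 h2 h3
  · exact Nat.le_refl i
  · exact Nat.le_trans (Nat.le_add_right i 2) (aSkipQ_ge cs q (i + 2))
  · exact Nat.le_trans (Nat.le_add_right i 1) (aSkipQ_ge cs q (i + 1))
  · exact Nat.le_refl i
termination_by cs.length - i
decreasing_by
  all_goals exact Nat.sub_lt_sub_left h1 (Nat.lt_add_of_pos_right (by decide))

theorem aLine_ge (cs : List Char) (i : Nat) : i ≤ aLine cs i := by
  rw [aLine]
  split_ifs with h1 h2
  · exact Nat.le_refl i
  · exact Nat.le_trans (Nat.le_add_right i 1) (aLine_ge cs (i + 1))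
  · exact Nat.le_refl i
termination_by cs.length - i
decreasing_by
  exact Nat.sub_lt_sub_left h1 (Nat.lt_add_of_pos_right (by decide))

theorem aBlock_ge (cs : List Char) (i : Nat) : i ≤ aBlock cs i := by
  rw [aBlock]
  split_ifs with h1 h2
  · exact Nat.le_refl i
  · exact Nat.le_trans (Nat.le_add_right i 1) (aBlock_ge cs (i + 1))
  · exact Nat.le_refl i
termination_by cs.length - i
decreasing_by
  exact Nat.sub_lt_sub_left (Nat.lt_of_succ_lt h1) (Nat.lt_add_of_pos_right (by decide))

-- A's inner object-scanning loop; returns the index one past the object.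
def aInner (cs : List Char) (i : Nat) (bd : Nat) : Nat :=
  if h : i < cs.length ∧ 0 < bd then
    if cs.getD i ' ' == '{' then aInner cs (i + 1) (bd + 1)
    else if cs.getD i ' ' == '}' then aInner cs (i + 1) (bd - 1)
    else if cs.getD i ' ' == '"' || cs.getD i ' ' == '\'' then aInner cs (aSkipQ cs (cs.getD i ' ') (i + 1) + 1) bd
    else if cs.getD i ' ' == '`' then aInner cs (aSkipQ cs '`' (i + 1) + 1) bd
    else if cs.getD i ' ' == '/' && i + 1 < cs.length then
      if cs.getD (i + 1) ' ' == '/' then aInner cs (aLine cs i + 1) bd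
      else if cs.getD (i + 1) ' ' == '*' then aInner cs (aBlock cs (i + 2) + 2) bd
      else aInner cs (i + 1) bd
    else aInner cs (i + 1) bd
  else i
termination_by cs.length - i
decreasing_by
  · exact Nat.sub_lt_sub_left h.1 (Nat.lt_add_of_pos_right (by decide))
  · exact Nat.sub_lt_sub_left h.1 (Nat.lt_add_of_pos_right (by decide))
  · exact Nat.sub_lt_sub_left h.1 (Nat.lt_succ_of_le
      (Nat.le_trans (Nat.le_succ i) (aSkipQ_ge cs (cs.getD i ' ') (i + 1))))
  · exact Nat.sub_lt_sub_left h.1 (Nat.lt_succ_of_le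
      (Nat.le_trans (Nat.le_succ i) (aSkipQ_ge cs '`' (i + 1))))
  · exact Nat.sub_lt_sub_left h.1 (Nat.lt_succ_of_le (aLine_ge cs i))
  · exact Nat.sub_lt_sub_left h.1 (Nat.lt_of_lt_of_le
      (Nat.lt_add_of_pos_right (by decide))
      (Nat.le_trans (aBlock_ge cs (i + 2)) (Nat.le_add_right _ 2)))
  · exact Nat.sub_lt_sub_left h.1 (Nat.lt_add_of_pos_right (by decide))
  · exact Nat.sub_lt_sub_left h.1 (Nat.lt_add_of_pos_right (by decide))

theorem aInner_ge (cs : List Char) (i : Nat) (bd : Nat) : i ≤ aInner cs i bd := by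
  rw [aInner]
  split_ifs with h0 h1 h2 h3 h4 h5 h6 h7
  · exact Nat.le_trans (Nat.le_succ i) (aInner_ge cs (i + 1) (bd + 1))
  · exact Nat.le_trans (Nat.le_succ i) (aInner_ge cs (i + 1) (bd - 1))
  · exact Nat.le_trans
      (Nat.le_trans (Nat.le_succ i)
        (Nat.le_trans (aSkipQ_ge cs (cs.getD i ' ') (i + 1)) (Nat.le_succ _)))
      (aInner_ge cs (aSkipQ cs (cs.getD i ' ') (i + 1) + 1) bd)
  · exact Nat.le_trans
      (Nat.le_trans (Nat.le_succ i)
        (Nat.le_trans (aSkipQ_ge cs '`' (i + 1)) (Nat.le_succ _)))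
      (aInner_ge cs (aSkipQ cs '`' (i + 1) + 1) bd)
  · exact Nat.le_trans (Nat.le_trans (aLine_ge cs i) (Nat.le_succ _))
      (aInner_ge cs (aLine cs i + 1) bd)
  · exact Nat.le_trans
      (Nat.le_trans (Nat.le_add_right i 2)
        (Nat.le_trans (aBlock_ge cs (i + 2)) (Nat.le_add_right _ 2)))
      (aInner_ge cs (aBlock cs (i + 2) + 2) bd)
  · exact Nat.le_trans (Nat.le_succ i) (aInner_ge cs (i + 1) bd)
  · exact Nat.le_trans (Nat.le_succ i) (aInner_ge cs (i + 1) bd)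
  · exact Nat.le_refl i
termination_by cs.length - i
decreasing_by
  · exact Nat.sub_lt_sub_left h0.1 (Nat.lt_add_of_pos_right (by decide))
  · exact Nat.sub_lt_sub_left h0.1 (Nat.lt_add_of_pos_right (by decide))
  · exact Nat.sub_lt_sub_left h0.1 (Nat.lt_succ_of_le
      (Nat.le_trans (Nat.le_succ i) (aSkipQ_ge cs (cs.getD i ' ') (i + 1))))
  · exact Nat.sub_lt_sub_left h0.1 (Nat.lt_succ_of_le
      (Nat.le_trans (Nat.le_succ i) (aSkipQ_ge cs '`' (i + 1))))
  · exact Nat.sub_lt_sub_left h0.1 (Nat.lt_succ_of_le (aLine_ge cs i))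
  · exact Nat.sub_lt_sub_left h0.1 (Nat.lt_of_lt_of_le
      (Nat.lt_add_of_pos_right (by decide))
      (Nat.le_trans (aBlock_ge cs (i + 2)) (Nat.le_add_right _ 2)))
  · exact Nat.sub_lt_sub_left h0.1 (Nat.lt_add_of_pos_right (by decide))
  · exact Nat.sub_lt_sub_left h0.1 (Nat.lt_add_of_pos_right (by decide))

-- A's outer loop over the array text.
def aOuter (cs : List Char) (i : Nat) (depth : Int) : List String :=
  if h : i < cs.length then
    if cs.getD i ' ' == '[' then aOuter cs (i + 1) (depth + 1)
    else if cs.getD i ' ' == ']' then aOuter cs (i + 1) (depth - 1)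
    else if cs.getD i ' ' == '{' && depth == 1 then
      let j := aInner cs (i + 1) 1
      ((cs.drop i).take (j - i)).asString :: aOuter cs j depth
    else aOuter cs (i + 1) depth
  else []
termination_by cs.length - i
decreasing_by
  · exact Nat.sub_lt_sub_left h (Nat.lt_add_of_pos_right (by decide))
  · exact Nat.sub_lt_sub_left h (Nat.lt_add_of_pos_right (by decide))
  · exact Nat.sub_lt_sub_left h (Nat.lt_of_lt_of_le (Nat.lt_succ_self i) (aInner_ge cs (i + 1) 1))
  · exact Nat.sub_lt_sub_left h (Nat.lt_add_of_pos_right (by decide))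

def find_top_level_objects_py (array_text : String) : List String :=
  aOuter array_text.toList 0 0

-- ===== PORT B =====
inductive BMode
  | arr : BMode
  | obj : BMode
  | instr : Char → BMode
  | linec : BMode
  | blockc : BMode
deriving DecidableEq, Repr

-- B: one flat loop, one character per step, dispatching on the state.
def bRun (cs : List Char) (mode : BMode) (i : Nat) (depth : Int) (bd : Nat)
    (os : Nat) (acc : List String) : List String :=
  if h : i < cs.length then
    match mode with
    | .arr =>
      if cs.getD i ' ' == '[' then bRun cs .arr (i + 1) (depth + 1) bd os acc
      else if cs.getD i ' ' == ']' then bRun cs .arr (i + 1) (depth - 1) bd os acc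
      else if cs.getD i ' ' == '{' && depth == 1 then bRun cs .obj (i + 1) depth 1 i acc
      else bRun cs .arr (i + 1) depth bd os acc
    | .obj =>
      if cs.getD i ' ' == '{' then bRun cs .obj (i + 1) depth (bd + 1) os acc
      else if cs.getD i ' ' == '}' then
        if bd == 1 then
          bRun cs .arr (i + 1) depth 0 0 (acc ++ [((cs.drop os).take (i + 1 - os)).asString])
        else bRun cs .obj (i + 1) depth (bd - 1) os acc
      else if cs.getD i ' ' == '"' || cs.getD i ' ' == '\'' || cs.getD i ' ' == '`' then bRun cs (.instr (cs.getD i ' ')) (i + 1) depth bd os acc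
      else if cs.getD i ' ' == '/' && i + 1 < cs.length && cs.getD (i + 1) ' ' == '/' then
        bRun cs .linec (i + 2) depth bd os acc
      else if cs.getD i ' ' == '/' && i + 1 < cs.length && cs.getD (i + 1) ' ' == '*' then
        bRun cs .blockc (i + 2) depth bd os acc
      else bRun cs .obj (i + 1) depth bd os acc
    | .instr q =>
      if cs.getD i ' ' == q then bRun cs .obj (i + 1) depth bd os acc
      else if cs.getD i ' ' == '\\' then bRun cs (.instr q) (i + 2) depth bd os acc
      else bRun cs (.instr q) (i + 1) depth bd os acc
    | .linec =>
      if cs.getD i ' ' == '\n' then bRun cs .obj (i + 1) depth bd os acc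
      else bRun cs .linec (i + 1) depth bd os acc
    | .blockc =>
      if cs.getD i ' ' == '*' && i + 1 < cs.length && cs.getD (i + 1) ' ' == '/' then
        bRun cs .obj (i + 2) depth bd os acc
      else bRun cs .blockc (i + 1) depth bd os acc
  else
    match mode with
    | .arr => acc
    | _ => acc ++ [((cs.drop os).take (cs.length - os)).asString]
termination_by cs.length - i
decreasing_by
  all_goals exact Nat.sub_lt_sub_left h (Nat.lt_add_of_pos_right (by decide))

def find_top_level_objects_py_alt (array_text : String) : List String :=
  bRun array_text.toList .arr 0 0 0 0 []

-- ===== PRECONDITION & SPEC =====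
def Spec_find_top_level_objects_py (array_text : String) (out : List String) : Prop := out = find_top_level_objects_py_alt array_text
instance (array_text : String) (out : List String) : Decidable (Spec_find_top_level_objects_py array_text out) := by unfold Spec_find_top_level_objects_py; infer_instance

-- ===== CLAIM (what is proved, stated in full; the proofs are below) =====
def Claim_equal_find_top_level_objects_py : Prop := ∀ (array_text : String), Dom_find_top_level_objects_py array_text → Spec_find_top_level_objects_py array_text (find_top_level_objects_py array_text)

-- ===== LEMMAS AND PROOFS =====

theorem bRun_stop (cs : List Char) (mode : BMode) (i : Nat) (depth : Int) (bd : Nat)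
    (os : Nat) (acc : List String) (h : cs.length ≤ i) :
    bRun cs mode i depth bd os acc =
      match mode with
      | .arr => acc
      | _ => acc ++ [((cs.drop os).take (cs.length - os)).asString] := by
  conv_lhs => rw [bRun.eq_def]
  rw [dif_neg (by omega)]

theorem bRun_instr_step (cs : List Char) (q : Char) (i : Nat) (depth : Int) (bd : Nat)
    (os : Nat) (acc : List String) (h : i < cs.length) :
    bRun cs (.instr q) i depth bd os acc =
      if cs.getD i ' ' == q then bRun cs .obj (i + 1) depth bd os acc
      else if cs.getD i ' ' == '\\' then bRun cs (.instr q) (i + 2) depth bd os acc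
      else bRun cs (.instr q) (i + 1) depth bd os acc := by
  conv_lhs => rw [bRun.eq_def]
  rw [dif_pos h]

theorem bRun_linec_step (cs : List Char) (i : Nat) (depth : Int) (bd : Nat)
    (os : Nat) (acc : List String) (h : i < cs.length) :
    bRun cs .linec i depth bd os acc =
      if cs.getD i ' ' == '\n' then bRun cs .obj (i + 1) depth bd os acc
      else bRun cs .linec (i + 1) depth bd os acc := by
  conv_lhs => rw [bRun.eq_def]
  rw [dif_pos h]

theorem bRun_blockc_step (cs : List Char) (i : Nat) (depth : Int) (bd : Nat)
    (os : Nat) (acc : List String) (h : i < cs.length) :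
    bRun cs .blockc i depth bd os acc =
      if cs.getD i ' ' == '*' && i + 1 < cs.length && cs.getD (i + 1) ' ' == '/' then
        bRun cs .obj (i + 2) depth bd os acc
      else bRun cs .blockc (i + 1) depth bd os acc := by
  conv_lhs => rw [bRun.eq_def]
  rw [dif_pos h]

theorem bRun_obj_step (cs : List Char) (i : Nat) (depth : Int) (bd : Nat)
    (os : Nat) (acc : List String) (h : i < cs.length) :
    bRun cs .obj i depth bd os acc =
      if cs.getD i ' ' == '{' then bRun cs .obj (i + 1) depth (bd + 1) os acc
      else if cs.getD i ' ' == '}' then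
        if bd == 1 then
          bRun cs .arr (i + 1) depth 0 0 (acc ++ [((cs.drop os).take (i + 1 - os)).asString])
        else bRun cs .obj (i + 1) depth (bd - 1) os acc
      else if cs.getD i ' ' == '"' || cs.getD i ' ' == '\'' || cs.getD i ' ' == '`' then
        bRun cs (.instr (cs.getD i ' ')) (i + 1) depth bd os acc
      else if cs.getD i ' ' == '/' && i + 1 < cs.length && cs.getD (i + 1) ' ' == '/' then
        bRun cs .linec (i + 2) depth bd os acc
      else if cs.getD i ' ' == '/' && i + 1 < cs.length && cs.getD (i + 1) ' ' == '*' then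
        bRun cs .blockc (i + 2) depth bd os acc
      else bRun cs .obj (i + 1) depth bd os acc := by
  conv_lhs => rw [bRun.eq_def]
  rw [dif_pos h]

theorem bRun_arr_step (cs : List Char) (i : Nat) (depth : Int) (bd : Nat)
    (os : Nat) (acc : List String) (h : i < cs.length) :
    bRun cs .arr i depth bd os acc =
      if cs.getD i ' ' == '[' then bRun cs .arr (i + 1) (depth + 1) bd os acc
      else if cs.getD i ' ' == ']' then bRun cs .arr (i + 1) (depth - 1) bd os acc
      else if cs.getD i ' ' == '{' && depth == 1 then bRun cs .obj (i + 1) depth 1 i acc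
      else bRun cs .arr (i + 1) depth bd os acc := by
  conv_lhs => rw [bRun.eq_def]
  rw [dif_pos h]

theorem aSkipQ_stop (cs : List Char) (q : Char) (i : Nat) (h : cs.length ≤ i) :
    aSkipQ cs q i = i := by
  rw [aSkipQ, dif_neg (by omega)]

theorem aLine_stop (cs : List Char) (i : Nat) (h : cs.length ≤ i) : aLine cs i = i := by
  rw [aLine, dif_neg (by omega)]

theorem aBlock_stop (cs : List Char) (i : Nat) (h : cs.length ≤ i + 1) : aBlock cs i = i := by
  rw [aBlock, dif_neg (by omega)]

theorem K_str (cs : List Char) (q : Char) :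
    ∀ k i depth bd os acc, cs.length - i ≤ k →
      bRun cs (.instr q) i depth bd os acc = bRun cs .obj (aSkipQ cs q i + 1) depth bd os acc := by
  intro k
  induction k with
  | zero =>
    intro i depth bd os acc hk
    have hi : cs.length ≤ i := by omega
    rw [bRun_stop cs _ i _ _ _ _ hi, aSkipQ_stop cs q i hi, bRun_stop cs _ (i + 1) _ _ _ _ (by omega)]
  | succ k ih =>
    intro i depth bd os acc hk
    by_cases hi : i < cs.length
    · rw [bRun_instr_step cs q i depth bd os acc hi]
      conv_rhs => rw [aSkipQ]
      rw [dif_pos hi]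
      by_cases hq : cs.getD i ' ' == q
      · rw [if_pos hq, if_pos hq]
      · rw [if_neg hq, if_neg hq]
        by_cases hb : cs.getD i ' ' == '\\'
        · rw [if_pos hb, if_pos hb, ih (i + 2) depth bd os acc (by omega)]
        · rw [if_neg hb, if_neg hb, ih (i + 1) depth bd os acc (by omega)]
    · have hi' : cs.length ≤ i := by omega
      rw [bRun_stop cs _ i _ _ _ _ hi', aSkipQ_stop cs q i hi', bRun_stop cs _ (i + 1) _ _ _ _ (by omega)]

theorem K_line (cs : List Char) :
    ∀ k i depth bd os acc, cs.length - i ≤ k →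
      bRun cs .linec i depth bd os acc = bRun cs .obj (aLine cs i + 1) depth bd os acc := by
  intro k
  induction k with
  | zero =>
    intro i depth bd os acc hk
    have hi : cs.length ≤ i := by omega
    rw [bRun_stop cs _ i _ _ _ _ hi, aLine_stop cs i hi, bRun_stop cs _ (i + 1) _ _ _ _ (by omega)]
  | succ k ih =>
    intro i depth bd os acc hk
    by_cases hi : i < cs.length
    · rw [bRun_linec_step cs i depth bd os acc hi]
      conv_rhs => rw [aLine]
      rw [dif_pos hi]
      by_cases hq : cs.getD i ' ' == '\n'
      · rw [if_pos hq, if_pos hq]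
      · rw [if_neg hq, if_neg hq, ih (i + 1) depth bd os acc (by omega)]
    · have hi' : cs.length ≤ i := by omega
      rw [bRun_stop cs _ i _ _ _ _ hi', aLine_stop cs i hi', bRun_stop cs _ (i + 1) _ _ _ _ (by omega)]

theorem K_block (cs : List Char) :
    ∀ k i depth bd os acc, cs.length - i ≤ k →
      bRun cs .blockc i depth bd os acc = bRun cs .obj (aBlock cs i + 2) depth bd os acc := by
  intro k
  induction k with
  | zero =>
    intro i depth bd os acc hk
    have hi : cs.length ≤ i := by omega
    rw [bRun_stop cs _ i _ _ _ _ hi, aBlock_stop cs i (by omega), bRun_stop cs _ (i + 2) _ _ _ _ (by omega)]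
  | succ k ih =>
    intro i depth bd os acc hk
    by_cases hi : i < cs.length
    · rw [bRun_blockc_step cs i depth bd os acc hi]
      by_cases h1 : i + 1 < cs.length
      · conv_rhs => rw [aBlock]
        rw [dif_pos h1]
        by_cases hp : cs.getD i ' ' == '*' && cs.getD (i + 1) ' ' == '/'
        · have hp' : (cs.getD i ' ' == '*' && decide (i + 1 < cs.length) && cs.getD (i + 1) ' ' == '/') = true := by
            simp only [Bool.and_eq_true, decide_eq_true_eq] at hp ⊢
            exact ⟨⟨hp.1, h1⟩, hp.2⟩
          rw [if_pos hp', if_pos hp]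
        · have hp' : ¬ (cs.getD i ' ' == '*' && decide (i + 1 < cs.length) && cs.getD (i + 1) ' ' == '/') = true := by
            simp only [Bool.and_eq_true, decide_eq_true_eq] at hp ⊢
            intro hc; exact hp ⟨hc.1.1, hc.2⟩
          rw [if_neg hp', if_neg hp, ih (i + 1) depth bd os acc (by omega)]
      · have hp' : ¬ (cs.getD i ' ' == '*' && decide (i + 1 < cs.length) && cs.getD (i + 1) ' ' == '/') = true := by
          simp only [Bool.and_eq_true, decide_eq_true_eq]
          intro hc; exact h1 hc.1.2
        rw [if_neg hp', aBlock_stop cs i (by omega)]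
        have hi1 : cs.length ≤ i + 1 := by omega
        rw [bRun_stop cs _ (i + 1) _ _ _ _ hi1, bRun_stop cs _ (i + 2) _ _ _ _ (by omega)]
    · have hi' : cs.length ≤ i := by omega
      rw [bRun_stop cs _ i _ _ _ _ hi', aBlock_stop cs i (by omega), bRun_stop cs _ (i + 2) _ _ _ _ (by omega)]

theorem slice_clamp (cs : List Char) (os a b : Nat) (ha : cs.length ≤ a) (hb : cs.length ≤ b) :
    (cs.drop os).take (a - os) = (cs.drop os).take (b - os) := by
  have h1 : (cs.drop os).length ≤ a - os := by simp [List.length_drop]; omega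
  have h2 : (cs.drop os).length ≤ b - os := by simp [List.length_drop]; omega
  rw [List.take_of_length_le h1, List.take_of_length_le h2]

theorem aLine_shift (cs : List Char) (i : Nat) (hi : i < cs.length) (h1 : i + 1 < cs.length)
    (c0 : ¬ cs.getD i ' ' == '\n') (c1 : ¬ cs.getD (i + 1) ' ' == '\n') :
    aLine cs i = aLine cs (i + 2) := by
  rw [aLine, dif_pos hi, if_neg c0]
  rw [aLine, dif_pos h1, if_neg c1]

theorem K_obj (cs : List Char) :
    ∀ k i depth bd os acc, cs.length - i ≤ k → 0 < bd →
      bRun cs .obj i depth bd os acc =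
        bRun cs .arr (aInner cs i bd) depth 0 0
          (acc ++ [((cs.drop os).take (aInner cs i bd - os)).asString]) := by
  intro k
  induction k with
  | zero =>
    intro i depth bd os acc hk hbd
    have hi : cs.length ≤ i := by omega
    rw [bRun_stop cs _ i _ _ _ _ hi]
    conv_rhs => rw [aInner]
    rw [dif_neg (by omega), bRun_stop cs _ i _ _ _ _ hi,
      slice_clamp cs os cs.length i (le_refl _) hi]
  | succ k ih =>
    intro i depth bd os acc hk hbd
    by_cases hi : i < cs.length
    · rw [bRun_obj_step cs i depth bd os acc hi]
      conv_rhs => rw [aInner]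
      rw [dif_pos ⟨hi, hbd⟩]
      by_cases hob : cs.getD i ' ' == '{'
      · rw [if_pos hob, if_pos hob, ih (i + 1) depth (bd + 1) os acc (by omega) (by omega)]
      · rw [if_neg hob, if_neg hob]
        by_cases hcb : cs.getD i ' ' == '}'
        · rw [if_pos hcb, if_pos hcb]
          by_cases h1 : bd = 1
          · subst h1
            rw [if_pos (by simp)]
            conv_rhs => rw [aInner]
            rw [dif_neg (by omega)]
          · rw [if_neg (by simpa using h1), ih (i + 1) depth (bd - 1) os acc (by omega) (by omega)]
        · rw [if_neg hcb, if_neg hcb]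
          by_cases hq : cs.getD i ' ' == '"' || cs.getD i ' ' == '\''
          · have hq3 : (cs.getD i ' ' == '"' || cs.getD i ' ' == '\'' || cs.getD i ' ' == '`') = true := by
              simp only [Bool.or_eq_true] at hq ⊢; tauto
            rw [if_pos hq3, if_pos hq]
            rw [K_str cs (cs.getD i ' ') (cs.length - (i + 1)) (i + 1) depth bd os acc (by omega)]
            have hge := aSkipQ_ge cs (cs.getD i ' ') (i + 1)
            rw [ih (aSkipQ cs (cs.getD i ' ') (i + 1) + 1) depth bd os acc (by omega) hbd]
          · rw [if_neg hq]
            by_cases hbt : cs.getD i ' ' == '`'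
            · have hq3 : (cs.getD i ' ' == '"' || cs.getD i ' ' == '\'' || cs.getD i ' ' == '`') = true := by
                simp only [Bool.or_eq_true] at hq hbt ⊢; tauto
              rw [if_pos hq3, if_pos hbt]
              have hbt' : cs.getD i ' ' = '`' := by simpa using hbt
              rw [K_str cs (cs.getD i ' ') (cs.length - (i + 1)) (i + 1) depth bd os acc (by omega), hbt']
              have hge := aSkipQ_ge cs '`' (i + 1)
              rw [ih (aSkipQ cs '`' (i + 1) + 1) depth bd os acc (by omega) hbd]
            · have hq3 : ¬ (cs.getD i ' ' == '"' || cs.getD i ' ' == '\'' || cs.getD i ' ' == '`') = true := by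
                simp only [Bool.or_eq_true] at hq hbt ⊢; tauto
              rw [if_neg hq3, if_neg hbt]
              by_cases hsl : cs.getD i ' ' == '/'
              · by_cases hn : i + 1 < cs.length
                · rw [if_pos (show (cs.getD i ' ' == '/' && decide (i + 1 < cs.length)) = true by
                    simp only [Bool.and_eq_true, decide_eq_true_eq]; exact ⟨hsl, hn⟩)]
                  by_cases h6 : cs.getD (i + 1) ' ' == '/'
                  · rw [if_pos h6,
                      if_pos (show (cs.getD i ' ' == '/' && decide (i + 1 < cs.length) && cs.getD (i + 1) ' ' == '/') = true by
                        simp only [Bool.and_eq_true, decide_eq_true_eq]; exact ⟨⟨hsl, hn⟩, h6⟩)]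
                    rw [K_line cs (cs.length - (i + 2)) (i + 2) depth bd os acc (by omega)]
                    rw [← aLine_shift cs i hi hn (by simp_all) (by simp_all)]
                    have hge := aLine_ge cs i
                    rw [ih (aLine cs i + 1) depth bd os acc (by omega) hbd]
                  · rw [if_neg h6,
                      if_neg (show ¬ (cs.getD i ' ' == '/' && decide (i + 1 < cs.length) && cs.getD (i + 1) ' ' == '/') = true by
                        simp only [Bool.and_eq_true, decide_eq_true_eq]; intro hc; exact h6 hc.2)]
                    by_cases h7 : cs.getD (i + 1) ' ' == '*'
                    · rw [if_pos h7,
                        if_pos (show (cs.getD i ' ' == '/' && decide (i + 1 < cs.length) && cs.getD (i + 1) ' ' == '*') = true by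
                          simp only [Bool.and_eq_true, decide_eq_true_eq]; exact ⟨⟨hsl, hn⟩, h7⟩)]
                      rw [K_block cs (cs.length - (i + 2)) (i + 2) depth bd os acc (by omega)]
                      have hge := aBlock_ge cs (i + 2)
                      rw [ih (aBlock cs (i + 2) + 2) depth bd os acc (by omega) hbd]
                    · rw [if_neg h7,
                        if_neg (show ¬ (cs.getD i ' ' == '/' && decide (i + 1 < cs.length) && cs.getD (i + 1) ' ' == '*') = true by
                          simp only [Bool.and_eq_true, decide_eq_true_eq]; intro hc; exact h7 hc.2)]
                      rw [ih (i + 1) depth bd os acc (by omega) hbd]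
                · rw [if_neg (show ¬ (cs.getD i ' ' == '/' && decide (i + 1 < cs.length)) = true by
                      simp only [Bool.and_eq_true, decide_eq_true_eq]; intro hc; exact hn hc.2),
                    if_neg (show ¬ (cs.getD i ' ' == '/' && decide (i + 1 < cs.length) && cs.getD (i + 1) ' ' == '/') = true by
                      simp only [Bool.and_eq_true, decide_eq_true_eq]; intro hc; exact hn hc.1.2),
                    if_neg (show ¬ (cs.getD i ' ' == '/' && decide (i + 1 < cs.length) && cs.getD (i + 1) ' ' == '*') = true by
                      simp only [Bool.and_eq_true, decide_eq_true_eq]; intro hc; exact hn hc.1.2)]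
                  rw [ih (i + 1) depth bd os acc (by omega) hbd]
              · rw [if_neg (show ¬ (cs.getD i ' ' == '/' && decide (i + 1 < cs.length)) = true by
                    simp only [Bool.and_eq_true, decide_eq_true_eq]; intro hc; exact hsl hc.1),
                  if_neg (show ¬ (cs.getD i ' ' == '/' && decide (i + 1 < cs.length) && cs.getD (i + 1) ' ' == '/') = true by
                    simp only [Bool.and_eq_true, decide_eq_true_eq]; intro hc; exact hsl hc.1.1),
                  if_neg (show ¬ (cs.getD i ' ' == '/' && decide (i + 1 < cs.length) && cs.getD (i + 1) ' ' == '*') = true by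
                    simp only [Bool.and_eq_true, decide_eq_true_eq]; intro hc; exact hsl hc.1.1)]
                rw [ih (i + 1) depth bd os acc (by omega) hbd]
    · have hi' : cs.length ≤ i := by omega
      rw [bRun_stop cs _ i _ _ _ _ hi']
      conv_rhs => rw [aInner]
      rw [dif_neg (by omega), bRun_stop cs _ i _ _ _ _ hi',
        slice_clamp cs os cs.length i (le_refl _) hi']

theorem K_arr (cs : List Char) :
    ∀ k i depth bd os acc, cs.length - i ≤ k →
      bRun cs .arr i depth bd os acc = acc ++ aOuter cs i depth := by
  intro k
  induction k with
  | zero =>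
    intro i depth bd os acc hk
    have hi : cs.length ≤ i := by omega
    rw [bRun_stop cs _ i _ _ _ _ hi]
    conv_rhs => rw [aOuter]
    rw [dif_neg (by omega), List.append_nil]
  | succ k ih =>
    intro i depth bd os acc hk
    by_cases hi : i < cs.length
    · rw [bRun_arr_step cs i depth bd os acc hi]
      conv_rhs => rw [aOuter]
      rw [dif_pos hi]
      by_cases h1 : cs.getD i ' ' == '['
      · rw [if_pos h1, if_pos h1, ih (i + 1) (depth + 1) bd os acc (by omega)]
      · rw [if_neg h1, if_neg h1]
        by_cases h2 : cs.getD i ' ' == ']'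
        · rw [if_pos h2, if_pos h2, ih (i + 1) (depth - 1) bd os acc (by omega)]
        · rw [if_neg h2, if_neg h2]
          by_cases h3 : cs.getD i ' ' == '{' && depth == 1
          · rw [if_pos h3, if_pos h3]
            rw [K_obj cs (cs.length - (i + 1)) (i + 1) depth 1 i acc (by omega) (by omega)]
            have hge := aInner_ge cs (i + 1) 1
            rw [ih (aInner cs (i + 1) 1) depth 0 0
              (acc ++ [((cs.drop i).take (aInner cs (i + 1) 1 - i)).asString]) (by omega)]
            simp
          · rw [if_neg h3, if_neg h3, ih (i + 1) depth bd os acc (by omega)]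
    · have hi' : cs.length ≤ i := by omega
      rw [bRun_stop cs _ i _ _ _ _ hi']
      conv_rhs => rw [aOuter]
      rw [dif_neg (by omega), List.append_nil]

-- ===== VERDICT (by name: the statement is the Claim_ definition above) =====
theorem find_top_level_objects_py_spec : Claim_equal_find_top_level_objects_py := by
  intro s _
  unfold Spec_find_top_level_objects_py find_top_level_objects_py find_top_level_objects_py_alt
  rw [K_arr s.toList s.toList.length 0 0 0 0 [] (by omega)]
  rfl
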